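-- pv_equiv track=rewrite | github.com/brendanxwhitaker/telephone | telephone/all_wordifications.py | get_substring_map
-- ===== SOURCE A (Python) =====
-- from typing import Set, Dict, List, Tuple
--
-- def get_substring_map(number: str) -> Dict[int, List[str]]:
--     """ Map starting indices to substrings of ``number``. """
--     if number == "":
--         return {}
--     substrs_map: Dict[int, List[str]] = {}
--     for i in range(len(number)):
--         substrs_starting_at_i: List[str] = []
--         for j in range(i, len(number)):
--             substr = number[i : j + 1]
--             substrs_starting_at_i.append(substr)
--         substrs_map[i] = substrs_starting_at_i
--     return substrs_map
-- ===== SOURCE B (Python) =====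
-- def get_substring_map(number: str):
--     """ Map starting indices to substrings of ``number``. """
--     # Right-to-left DP: the list for index i is rebuilt from the list for i+1
--     # by prepending number[i], instead of re-slicing every substring.
--     rows = []
--     suffix = []
--     for ch in reversed(number):
--         suffix = [ch] + [ch + s for s in suffix]
--         rows.append(suffix)
--     rows.reverse()
--     return dict(enumerate(rows))
-- ===== Notes on version B (the rewrite author's own statement) =====
-- stated objective: alternative
-- what changed: Replaces the nested index loops that slice number[i:j+1] from scratch with a single right-to-left pass maintaining the previous index's substring list (map[i] = [number[i]] + [number[i]+s for s in map[i+1]]), paired with dict(enumerate(...)).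
import Mathlib
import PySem

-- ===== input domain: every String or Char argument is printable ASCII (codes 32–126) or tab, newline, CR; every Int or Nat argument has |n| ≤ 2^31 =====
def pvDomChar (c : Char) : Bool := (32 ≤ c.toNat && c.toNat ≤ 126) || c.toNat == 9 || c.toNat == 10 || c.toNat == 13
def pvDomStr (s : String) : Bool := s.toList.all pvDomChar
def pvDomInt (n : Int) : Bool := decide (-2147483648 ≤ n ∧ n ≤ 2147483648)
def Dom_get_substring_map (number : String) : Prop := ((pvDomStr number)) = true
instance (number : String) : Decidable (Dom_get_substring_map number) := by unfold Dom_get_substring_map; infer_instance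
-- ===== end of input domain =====

-- B builds each index's substring list from the list of the next index in one right-to-left
-- pass (a different decomposition); A re-slices every substring with two nested index loops.

-- ===== PORT A =====
def get_substring_map (number : String) : List (Int × List String) :=
  if number == "" then []
  else
    ((PySem.List.pyRange 0 (PySem.Str.len number)).foldl
      (fun (d : PySem.Dict Int (List String)) i =>
        d.insert i
          ((PySem.List.pyRange i (PySem.Str.len number)).foldl
            (fun acc j => acc ++ [PySem.Str.slice number (some i) (some (j + 1))]) []))
      PySem.Dict.empty).items

-- ===== PORT B =====
-- 'ch + s' (one-char string ++ string) is ported exactly as String.ofList (ch :: s.toList)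
def get_substring_map_alt (number : String) : List (Int × List String) :=
  let st := number.toList.reverse.foldl
    (fun (st : List (List String) × List String) ch =>
      let suffix := String.ofList [ch] :: st.2.map (fun s => String.ofList (ch :: s.toList))
      (st.1 ++ [suffix], suffix))
    ([], [])
  (PySem.Dict.ofList (PySem.List.enumerate st.1.reverse)).items

-- ===== PRECONDITION & SPEC =====
def Spec_get_substring_map (number : String) (out : List (Int × List String)) : Prop := out = get_substring_map_alt number
instance (number : String) (out : List (Int × List String)) : Decidable (Spec_get_substring_map number out) := by unfold Spec_get_substring_map; infer_instance

-- ===== CLAIM (what is proved, stated in full; the proofs are below) =====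
def Claim_equal_get_substring_map : Prop := ∀ (number : String), Dom_get_substring_map number → Spec_get_substring_map number (get_substring_map number)

-- ===== LEMMAS AND PROOFS =====

-- the ordered list of substrings starting at the head of s (shortest first)
def pvRowOf (s : List Char) : List String :=
  (List.range s.length).map (fun k => String.ofList (s.take (k + 1)))

def pvRowsOf : List Char → List (List String)
  | [] => []
  | c :: rest => pvRowOf (c :: rest) :: pvRowsOf rest

theorem pvPyRange_shift (k : Nat) : ∀ (i : Nat),
    PySem.List.pyRange (i : Int) ((i : Int) + (k : Int)) =
      (List.range k).map (fun t => ((i + t : Nat) : Int)) := by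
  induction k with
  | zero => intro i; simp [PySem.List.pyRange_one_eq_nil]
  | succ k ih =>
    intro i
    rw [show ((k + 1 : Nat) : Int) = (k : Int) + 1 by push_cast; ring]
    have h1 : (i : Int) < (i : Int) + ((k : Int) + 1) := by omega
    rw [PySem.List.pyRange_one_cons h1,
        show (i : Int) + ((k : Int) + 1) = ((i + 1 : Nat) : Int) + (k : Int) by push_cast; ring,
        show (i : Int) + 1 = ((i + 1 : Nat) : Int) by push_cast; ring,
        ih (i + 1), List.range_succ_eq_map]
    simp only [List.map_cons, List.map_map, Function.comp_def, Nat.add_zero]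
    refine List.cons_eq_cons.mpr ⟨by simp, ?_⟩
    apply List.map_congr_left; intro t _; congr 1; omega

theorem pvRowA_eq (number : String) (i : Nat) (h : i ≤ number.toList.length) :
    (PySem.List.pyRange (i : Int) ((number.toList.length : Nat) : Int)).foldl
      (fun acc j => acc ++ [PySem.Str.slice number (some i) (some (j + 1))]) []
    = pvRowOf (number.toList.drop i) := by
  rw [show ((number.toList.length : Nat) : Int)
        = (i : Int) + ((number.toList.length - i : Nat) : Int) by omega,
      pvPyRange_shift, PySem.List.foldl_append_singleton_eq_map, List.nil_append, List.map_map]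
  unfold pvRowOf
  rw [List.length_drop]
  apply List.map_congr_left
  intro t _
  apply String.toList_inj.mp
  rw [Function.comp_apply, PySem.Str.toList_slice, String.toList_ofList,
      PySem.Chars.slice_eq_listSlice,
      show ((i + t : Nat) : Int) + 1 = (i : Int) + ((t + 1 : Nat) : Int) by push_cast; ring,
      PySem.List.slice_natCast_add]

theorem pvRowsOf_eq_map (cs : List Char) :
    pvRowsOf cs = (List.range cs.length).map (fun i => pvRowOf (cs.drop i)) := by
  induction cs with
  | nil => simp [pvRowsOf]
  | cons c rest ih =>
    simp [pvRowsOf, List.range_succ_eq_map, ih, List.map_map, Function.comp_def]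

theorem pvStep_row (c : Char) (rest : List Char) :
    (String.ofList [c] :: (pvRowOf rest).map (fun t => String.ofList (c :: t.toList)))
      = pvRowOf (c :: rest) := by
  simp [pvRowOf, List.range_succ_eq_map, List.map_map, Function.comp_def]

theorem pvLoopB (cs : List Char) :
    cs.reverse.foldl
      (fun (st : List (List String) × List String) ch =>
        let suffix := String.ofList [ch] :: st.2.map (fun s => String.ofList (ch :: s.toList))
        (st.1 ++ [suffix], suffix))
      ([], [])
    = ((pvRowsOf cs).reverse, pvRowOf cs) := by
  induction cs with
  | nil => simp [pvRowsOf, pvRowOf]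
  | cons c rest ih =>
    simp only [List.reverse_cons, List.foldl_append, ih, List.foldl_cons, List.foldl_nil]
    simp [pvRowsOf, pvStep_row]

theorem pvEnumMap {α : Type} (g : Nat → α) : ∀ (n : Nat) (s : Int),
    PySem.List.enumerate ((List.range n).map g) s
      = (List.range n).map (fun (i : Nat) => (s + (i : Int), g i)) := by
  intro n
  induction n with
  | zero => intro s; simp [PySem.List.enumerate_nil]
  | succ n ih =>
    intro s
    rw [List.range_succ, List.map_append, PySem.List.enumerate_append, ih, List.map_append]
    simp [PySem.List.enumerate_cons, PySem.List.enumerate_nil]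

theorem pvItems_ofList {ν : Type} (l : List (Int × ν)) (h : (l.map (fun p => p.1)).Nodup) :
    (PySem.Dict.ofList l).items = l := by
  have hit := PySem.Dict.items_foldl_insert_fresh l (fun p => p.1) (fun p => p.2)
    PySem.Dict.empty (fun a _ => PySem.Dict.contains_empty _) h
  have hof : PySem.Dict.ofList l
      = l.foldl (fun d p => d.insert p.1 p.2) PySem.Dict.empty := rfl
  rw [hof]
  simpa [PySem.Dict.empty] using hit

theorem pvA_eq (number : String) :
    get_substring_map number
      = (List.range number.toList.length).map
          (fun (i : Nat) => ((i : Int), pvRowOf (number.toList.drop i))) := by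
  unfold get_substring_map
  by_cases h0 : number = ""
  · subst h0; simp
  · rw [if_neg (by simp [h0]), PySem.Str.len_eq, PySem.List.pyRange_zero_natCast]
    simp only [List.foldl_map]
    rw [PySem.Dict.items_foldl_insert_fresh (List.range number.toList.length)
          (fun a : Nat => (a : Int)) _ _
          (fun a _ => PySem.Dict.contains_empty _)
          (List.Nodup.map (fun a b hab => by exact_mod_cast hab) List.nodup_range)]
    have hempty : (PySem.Dict.empty : PySem.Dict Int (List String)).items = [] := by
      simp [PySem.Dict.empty]
    rw [hempty, List.nil_append]
    apply List.map_congr_left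
    intro a ha
    rw [pvRowA_eq number a (le_of_lt (List.mem_range.mp ha))]

theorem pvB_eq (number : String) :
    get_substring_map_alt number
      = (List.range number.toList.length).map
          (fun (i : Nat) => ((i : Int), pvRowOf (number.toList.drop i))) := by
  unfold get_substring_map_alt
  rw [pvLoopB number.toList]
  simp only [List.reverse_reverse]
  rw [pvItems_ofList _ (by
        rw [PySem.List.map_fst_enumerate]
        rw [pvRowsOf_eq_map]
        simp only [List.length_map, List.length_range, zero_add,
          PySem.List.pyRange_zero_natCast]
        exact List.Nodup.map (fun a b hab => by exact_mod_cast hab) List.nodup_range)]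
  rw [pvRowsOf_eq_map, pvEnumMap]
  simp

-- ===== VERDICT (by name: the statement is the Claim_ definition above) =====
theorem get_substring_map_spec : Claim_equal_get_substring_map := by
  intro number _
  unfold Spec_get_substring_map
  rw [pvA_eq, pvB_eq]
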